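-- pv_equiv track=rewrite | github.com/avigold/my-second | src/mysecond/search.py | _path_str
-- ===== SOURCE A (Python) =====
-- def _path_str(book_moves_san: list[str]) -> str:
--     """Format a SAN move list as a compact opening path string.
--
--     Example: ["e4", "e5", "Nf3", "Nc6"] → "1.e4 e5 2.Nf3 Nc6"
--     """
--     if not book_moves_san:
--         return "starting position"
--     parts: list[str] = []
--     for i, san in enumerate(book_moves_san):
--         if i % 2 == 0:
--             parts.append(f"{i // 2 + 1}.{san}")
--         else:
--             parts.append(san)
--     return " ".join(parts)
-- ===== SOURCE B (Python) =====
-- def _path_str(book_moves_san: list[str]) -> str: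
--     """Format a SAN move list as a compact opening path string."""
--     if not book_moves_san:
--         return "starting position"
--     chunks = []
--     n = 1
--     i = 0
--     while i < len(book_moves_san):
--         if i + 1 < len(book_moves_san):
--             chunks.append(f"{n}.{book_moves_san[i]} {book_moves_san[i + 1]}")
--         else:
--             chunks.append(f"{n}.{book_moves_san[i]}")
--         i += 2
--         n += 1
--     return " ".join(chunks)
-- ===== Notes on version B (the rewrite author's own statement) =====
-- stated objective: alternative
-- what changed: Replaces the per-move enumerate loop with index parity tests and i//2 numbering by a pair-consuming loop that emits one 'n.white black' chunk per full move pair (lone white move as 'n.white'), joined with spaces.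
import Mathlib
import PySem

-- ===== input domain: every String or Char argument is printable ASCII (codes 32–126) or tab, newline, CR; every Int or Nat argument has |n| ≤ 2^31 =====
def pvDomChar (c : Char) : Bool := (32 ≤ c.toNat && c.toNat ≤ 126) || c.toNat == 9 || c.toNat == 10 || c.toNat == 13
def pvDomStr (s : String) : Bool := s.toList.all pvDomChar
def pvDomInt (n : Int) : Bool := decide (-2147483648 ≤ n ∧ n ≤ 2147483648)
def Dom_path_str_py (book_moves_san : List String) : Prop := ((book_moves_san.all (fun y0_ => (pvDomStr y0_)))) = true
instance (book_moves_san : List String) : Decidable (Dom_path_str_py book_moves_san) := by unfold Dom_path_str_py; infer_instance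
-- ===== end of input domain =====

-- B replaces A's enumerate/parity loop by a pair-consuming loop (one chunk per move pair); alternative decomposition, same cost.

-- ===== PORT A =====
def path_str_py (book_moves_san : List String) : String :=
  if book_moves_san = [] then "starting position"
  else
    let parts : List String :=
      (PySem.List.enumerate book_moves_san 0).foldl (fun parts p =>
        if PySem.Int.mod p.1 2 = 0 then
          parts ++ [PySem.Int.toStr (PySem.Int.floordiv p.1 2 + 1) ++ "." ++ p.2]
        else
          parts ++ [p.2]) []
    PySem.Str.join " " parts

-- ===== PORT B =====
def pvPairChunks : Int → List String → List String
  | _, [] => []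
  | n, [w] => [PySem.Int.toStr n ++ "." ++ w]
  | n, w :: b :: rest => (PySem.Int.toStr n ++ "." ++ w ++ " " ++ b) :: pvPairChunks (n + 1) rest

def path_str_py_alt (book_moves_san : List String) : String :=
  if book_moves_san = [] then "starting position"
  else PySem.Str.join " " (pvPairChunks 1 book_moves_san)

-- ===== PRECONDITION & SPEC =====
def Spec_path_str_py (book_moves_san : List String) (out : String) : Prop := out = path_str_py_alt book_moves_san
instance (book_moves_san : List String) (out : String) : Decidable (Spec_path_str_py book_moves_san out) := by unfold Spec_path_str_py; infer_instance

-- ===== CLAIM (what is proved, stated in full; the proofs are below) =====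
def Claim_equal_path_str_py : Prop := ∀ (book_moves_san : List String), Dom_path_str_py book_moves_san → Spec_path_str_py book_moves_san (path_str_py book_moves_san)

-- ===== LEMMAS AND PROOFS =====

theorem pv_join_merge (sep x y : List Char) (r : List (List Char)) :
    PySem.Chars.join sep (x :: y :: r) = PySem.Chars.join sep ((x ++ sep ++ y) :: r) := by
  cases r with
  | nil => simp [PySem.Chars.join_cons_cons, PySem.Chars.join_singleton]
  | cons z zs => simp [PySem.Chars.join_cons_cons]

theorem pvPairChunks_cons (n : Int) (a : String) (t : List String) :
    ∃ c cs, pvPairChunks n (a :: t) = c :: cs := by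
  cases t <;> exact ⟨_, _, rfl⟩

theorem pv_join_lemma : ∀ (n : Int) (l : List String),
    PySem.Str.join " " ((PySem.List.enumerate l (2 * (n - 1))).map (fun p =>
      if PySem.Int.mod p.1 2 = 0 then
        PySem.Int.toStr (PySem.Int.floordiv p.1 2 + 1) ++ "." ++ p.2
      else p.2))
    = PySem.Str.join " " (pvPairChunks n l) := by
  intro n l
  induction n, l using pvPairChunks.induct with
  | case1 n => simp [PySem.List.enumerate_nil, pvPairChunks]
  | case2 n w =>
      have hmod : PySem.Int.mod (2 * (n - 1)) 2 = 0 :=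
        (PySem.Int.mod_eq_zero_iff_dvd _ _).mpr ⟨n - 1, by ring⟩
      have hdiv : PySem.Int.floordiv (2 * (n - 1)) 2 = n - 1 :=
        (PySem.Int.floordiv_eq_iff_of_pos (by norm_num)).mpr (by constructor <;> omega)
      simp [PySem.List.enumerate_cons, PySem.List.enumerate_nil, pvPairChunks]
  | case3 n w b rest ih =>
      have hn : n - 1 + 1 = n := by ring
      have hmod : PySem.Int.mod (2 * (n - 1)) 2 = 0 :=
        (PySem.Int.mod_eq_zero_iff_dvd _ _).mpr ⟨n - 1, by ring⟩
      have hmod1 : ¬ PySem.Int.mod (2 * (n - 1) + 1) 2 = 0 := by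
        rw [PySem.Int.mod_eq_zero_iff_dvd]; omega
      have hdiv : PySem.Int.floordiv (2 * (n - 1)) 2 = n - 1 :=
        (PySem.Int.floordiv_eq_iff_of_pos (by norm_num)).mpr (by constructor <;> omega)
      have harg : 2 * (n - 1) + 1 + 1 = 2 * (n + 1 - 1) := by ring
      rw [PySem.List.enumerate_cons, PySem.List.enumerate_cons, harg]
      apply String.toList_inj.mp
      rw [PySem.Str.toList_join, PySem.Str.toList_join]
      simp only [List.map_cons, if_pos hmod, if_neg hmod1, hdiv, hn, pvPairChunks]
      rw [pv_join_merge]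
      have hih := congrArg String.toList ih
      rw [PySem.Str.toList_join, PySem.Str.toList_join] at hih
      cases rest with
      | nil =>
          simp [pvPairChunks, PySem.List.enumerate_nil, PySem.Chars.join_singleton]
      | cons a t =>
          obtain ⟨c, cs, hc⟩ := pvPairChunks_cons (n + 1) a t
          rw [hc] at hih ⊢
          rw [PySem.List.enumerate_cons] at hih ⊢
          simp only [List.map_cons] at hih ⊢
          rw [PySem.Chars.join_cons_cons, PySem.Chars.join_cons_cons, hih]
          simp

-- ===== VERDICT (by name: the statement is the Claim_ definition above) =====
theorem path_str_py_spec : Claim_equal_path_str_py := by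
  intro l _
  unfold Spec_path_str_py path_str_py path_str_py_alt
  by_cases h : l = []
  · simp [h]
  · simp only [if_neg h]
    rw [PySem.List.foldl_congr_mem _ _
      (fun parts p => parts ++ [if PySem.Int.mod p.1 2 = 0 then
        PySem.Int.toStr (PySem.Int.floordiv p.1 2 + 1) ++ "." ++ p.2 else p.2]) _
      (by intro acc x _; dsimp only; split_ifs <;> rfl)]
    rw [PySem.List.foldl_append_singleton_eq_map, List.nil_append]
    have := pv_join_lemma 1 l
    norm_num at this ⊢
    exact this
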